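-- pv_equiv track=rewrite | github.com/RuddyMoriarty/moriarty-cfo | cfo-init/scripts/portfolio/portfolio_dashboard.py | build_resume
-- ===== SOURCE A (Python) =====
-- def build_resume(alerts: list, clients_actifs: int) -> str:
--     if clients_actifs == 0:
--         return "Aucun client actif dans le portfolio."
--     rouges = len([a for a in alerts if a["couleur"] == "rouge"])
--     oranges = len([a for a in alerts if a["couleur"] == "orange"])
--     jaunes = len([a for a in alerts if a["couleur"] == "jaune"])
--     parts = [f"{clients_actifs} client(s) actif(s)."]
--     if rouges:
--         parts.append(f"Echeance(s) urgente(s) (< 7j) : {rouges}.")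
--     if oranges:
--         parts.append(f"A preparer (7-14j) : {oranges}.")
--     if jaunes:
--         parts.append(f"A planifier (15-30j) : {jaunes}.")
--     if not (rouges or oranges or jaunes):
--         parts.append("Aucune echeance urgente ce mois-ci.")
--     return " ".join(parts)
-- ===== SOURCE B (Python) =====
-- COLORS = ("rouge", "orange", "jaune")
-- LABELS = ("Echeance(s) urgente(s) (< 7j)", "A preparer (7-14j)", "A planifier (15-30j)")
--
-- def build_resume(alerts: list, clients_actifs: int) -> str:
--     if clients_actifs == 0:
--         return "Aucun client actif dans le portfolio."
--     # one pass over alerts: accumulate a 3-vector of counts indexed by the color table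
--     counts = [0, 0, 0]
--     for a in alerts:
--         c = a["couleur"]
--         if c in COLORS:
--             counts[COLORS.index(c)] += 1
--     # table-driven formatting: one line per nonzero entry, with a fallback when none
--     tail = [f"{label} : {n}." for label, n in zip(LABELS, counts) if n] \
--         or ["Aucune echeance urgente ce mois-ci."]
--     return " ".join([f"{clients_actifs} client(s) actif(s)."] + tail)
-- ===== Notes on version B (the rewrite author's own statement) =====
-- stated objective: alternative
-- what changed: B replaces A's three filtering scans and its if-branch chain with a single tallying pass into a 3-vector of counts plus table-driven formatting: the summary lines come from a comprehension over a (label, count) table with an 'or'-fallback, instead of four sequential conditional appends.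
import Mathlib
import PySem

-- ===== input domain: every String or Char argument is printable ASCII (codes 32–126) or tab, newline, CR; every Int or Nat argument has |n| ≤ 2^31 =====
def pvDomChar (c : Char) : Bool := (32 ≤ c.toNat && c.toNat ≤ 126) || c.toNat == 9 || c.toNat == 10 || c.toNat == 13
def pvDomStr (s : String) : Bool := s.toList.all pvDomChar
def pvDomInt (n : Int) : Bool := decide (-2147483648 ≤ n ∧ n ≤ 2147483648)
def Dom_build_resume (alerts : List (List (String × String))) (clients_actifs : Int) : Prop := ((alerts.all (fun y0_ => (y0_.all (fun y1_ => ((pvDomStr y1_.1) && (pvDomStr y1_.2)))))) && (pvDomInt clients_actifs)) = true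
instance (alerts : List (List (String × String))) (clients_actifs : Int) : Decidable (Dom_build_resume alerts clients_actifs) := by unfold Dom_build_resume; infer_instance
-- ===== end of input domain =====

-- B replaces A's three filtering scans and branch chain with one tallying pass into a 3-vector plus table-driven formatting; same return value on Pre_.

-- ===== PORT A =====
def build_resume (alerts : List (List (String × String))) (clients_actifs : Int) : String :=
  if clients_actifs == 0 then "Aucun client actif dans le portfolio."
  else
    let rouges : Int := (alerts.filter (fun a => (PySem.Dict.ofList a).get? "couleur" == some "rouge")).length
    let oranges : Int := (alerts.filter (fun a => (PySem.Dict.ofList a).get? "couleur" == some "orange")).length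
    let jaunes : Int := (alerts.filter (fun a => (PySem.Dict.ofList a).get? "couleur" == some "jaune")).length
    let parts : List String := [PySem.Int.toStr clients_actifs ++ " client(s) actif(s)."]
    let parts := if rouges != 0 then parts ++ ["Echeance(s) urgente(s) (< 7j) : " ++ PySem.Int.toStr rouges ++ "."] else parts
    let parts := if oranges != 0 then parts ++ ["A preparer (7-14j) : " ++ PySem.Int.toStr oranges ++ "."] else parts
    let parts := if jaunes != 0 then parts ++ ["A planifier (15-30j) : " ++ PySem.Int.toStr jaunes ++ "."] else parts
    let parts := if !(rouges != 0 || oranges != 0 || jaunes != 0) then parts ++ ["Aucune echeance urgente ce mois-ci."] else parts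
    PySem.Str.join " " parts

-- ===== PORT B =====
-- a["couleur"]: under Pre_ the key is present; the .getD "" never fires inside Pre_.
-- 'if c in COLORS: counts[COLORS.index(c)] += 1' is expanded into the equivalent
-- position chain over the literal 3-tuple (exact: COLORS = ("rouge","orange","jaune")).
def brStep (t : Int × Int × Int) (a : List (String × String)) : Int × Int × Int :=
  let c := ((PySem.Dict.ofList a).get? "couleur").getD ""
  if c = "rouge" then (t.1 + 1, t.2.1, t.2.2)
  else if c = "orange" then (t.1, t.2.1 + 1, t.2.2)
  else if c = "jaune" then (t.1, t.2.1, t.2.2 + 1)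
  else t

def build_resume_alt (alerts : List (List (String × String))) (clients_actifs : Int) : String :=
  if clients_actifs == 0 then "Aucun client actif dans le portfolio."
  else
    let counts := alerts.foldl brStep (0, 0, 0)
    let table : List (String × Int) :=
      List.zip ["Echeance(s) urgente(s) (< 7j)", "A preparer (7-14j)", "A planifier (15-30j)"]
               [counts.1, counts.2.1, counts.2.2]
    let tail := (table.filter (fun p => p.2 != 0)).map
                  (fun p => p.1 ++ " : " ++ PySem.Int.toStr p.2 ++ ".")
    let tail := if tail.isEmpty then ["Aucune echeance urgente ce mois-ci."] else tail
    PySem.Str.join " " ([PySem.Int.toStr clients_actifs ++ " client(s) actif(s)."] ++ tail)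

-- ===== PRECONDITION & SPEC =====
-- Pre_ excludes only inputs on which A raises KeyError: clients_actifs ≠ 0 and some alert lacks the "couleur" key.
def Pre_build_resume (alerts : List (List (String × String))) (clients_actifs : Int) : Prop :=
  clients_actifs = 0 ∨ ∀ a ∈ alerts, "couleur" ∈ a.map Prod.fst
instance (alerts : List (List (String × String))) (clients_actifs : Int) : Decidable (Pre_build_resume alerts clients_actifs) := by unfold Pre_build_resume; infer_instance

def pvWitness_build_resume : (List (List (String × String))) × Int :=
  ([[("couleur", "rouge")], [("couleur", "vert")]], 3)

def Spec_build_resume (alerts : List (List (String × String))) (clients_actifs : Int) (out : String) : Prop := out = build_resume_alt alerts clients_actifs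
instance (alerts : List (List (String × String))) (clients_actifs : Int) (out : String) : Decidable (Spec_build_resume alerts clients_actifs out) := by unfold Spec_build_resume; infer_instance

-- ===== CLAIM (what is proved, stated in full; the proofs are below) =====
def Claim_equal_build_resume : Prop := ∀ (alerts : List (List (String × String))) (clients_actifs : Int), Dom_build_resume alerts clients_actifs → Pre_build_resume alerts clients_actifs → Spec_build_resume alerts clients_actifs (build_resume alerts clients_actifs)

-- ===== LEMMAS AND PROOFS =====

-- the single tallying pass computes exactly A's three filter-lengths
lemma tally_eq (alerts : List (List (String × String))) : ∀ r o j : Int,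
    alerts.foldl brStep (r, o, j) =
      (r + ((alerts.filter (fun a => (PySem.Dict.ofList a).get? "couleur" == some "rouge")).length : Int),
       o + ((alerts.filter (fun a => (PySem.Dict.ofList a).get? "couleur" == some "orange")).length : Int),
       j + ((alerts.filter (fun a => (PySem.Dict.ofList a).get? "couleur" == some "jaune")).length : Int)) := by
  induction alerts with
  | nil => intro r o j; simp
  | cons a rest ih =>
    intro r o j
    simp only [List.foldl_cons, List.filter_cons]
    rcases hg : (PySem.Dict.ofList a).get? "couleur" with _ | v
    · simp [brStep, hg, ih]
    · by_cases hr : v = "rouge"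
      · simp [brStep, hg, hr, ih]; ring
      · by_cases ho : v = "orange"
        · simp [brStep, hg, ho, ih]; ring
        · by_cases hj : v = "jaune"
          · simp [brStep, hg, hj, ih]; ring
          · simp [brStep, hg, hr, ho, hj, ih]

-- ===== VERDICT (by name: the statement is the Claim_ definition above) =====
theorem build_resume_spec : Claim_equal_build_resume := by
  intro alerts n _ _
  unfold Spec_build_resume build_resume build_resume_alt
  by_cases h0 : n = 0
  · simp [h0]
  · simp only [beq_iff_eq, if_neg h0]
    rw [tally_eq alerts 0 0 0]
    simp only [zero_add]
    set r : Int := ((alerts.filter (fun a => (PySem.Dict.ofList a).get? "couleur" == some "rouge")).length : Int) with hr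
    set o : Int := ((alerts.filter (fun a => (PySem.Dict.ofList a).get? "couleur" == some "orange")).length : Int) with ho
    set j : Int := ((alerts.filter (fun a => (PySem.Dict.ofList a).get? "couleur" == some "jaune")).length : Int) with hj
    by_cases h1 : r = 0 <;> by_cases h2 : o = 0 <;> by_cases h3 : j = 0 <;>
      simp [h1, h2, h3, List.zip, PySem.Str.join]
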